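-- pv_equiv track=rewrite | github.com/Wisc-HCI/TabulaSynthesizer | synthesizer/src/planner.py | contains_triple_loop
-- ===== SOURCE A (Python) =====
-- def contains_triple_loop(current):
--     act_history = current[0]
--     act_history = [str(ah) for ah in act_history]
--     if len(act_history) < 3:
--         return False
--     i = len(act_history) - 1
--     contains = False
--     while True:
--         slice_size = len(act_history) - i
--         if len(act_history) < slice_size * 3:
--             break
--         first_slice = act_history[i:]
--         second_slice = act_history[i-slice_size:i]
--         third_slice = act_history[i-(slice_size*2):i-slice_size]
--         if first_slice == second_slice == third_slice:
--             contains = True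
--             break
--         i -= 1
--     return contains
-- ===== SOURCE B (Python) =====
-- def _code(s, MOD=(1 << 61) - 1, BASE=1000003):
--     c = 0
--     for ch in s:
--         c = (c * BASE + ord(ch) + 1) % MOD
--     return c
--
--
-- def contains_triple_loop(current):
--     seq = [str(ah) for ah in current[0]]
--     n = len(seq)
--     if n < 3:
--         return False
--     MOD = (1 << 61) - 1
--     BASE = 1000003
--     codes = [_code(s) for s in seq]
--     # prefix hashes: h[j] hashes seq[:j]; pw[d] = BASE**d % MOD
--     h = [0]
--     cur = 0
--     for c in codes:
--         cur = (cur * BASE + c + 1) % MOD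
--         h.append(cur)
--     pw = [1]
--     p = 1
--     for _ in range(n):
--         p = p * BASE % MOD
--         pw.append(p)
--     for k in range(1, n // 3 + 1):
--         ha = (h[n - k] - h[n - 3 * k] * pw[2 * k]) % MOD
--         hb = (h[n] - h[n - 2 * k] * pw[2 * k]) % MOD
--         if ha == hb and seq[n - 3 * k:n - k] == seq[n - 2 * k:]:
--             return True
--     return False
-- ===== Notes on version B (the rewrite author's own statement) =====
-- stated objective: alternative
-- what changed: Instead of comparing three tail slices per candidate block size, B precomputes rolling polynomial prefix hashes once and tests each block size with one O(1) hash comparison of the folded single shifted-slice condition, verifying by a direct slice comparison only on a hash match.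
import Mathlib
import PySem

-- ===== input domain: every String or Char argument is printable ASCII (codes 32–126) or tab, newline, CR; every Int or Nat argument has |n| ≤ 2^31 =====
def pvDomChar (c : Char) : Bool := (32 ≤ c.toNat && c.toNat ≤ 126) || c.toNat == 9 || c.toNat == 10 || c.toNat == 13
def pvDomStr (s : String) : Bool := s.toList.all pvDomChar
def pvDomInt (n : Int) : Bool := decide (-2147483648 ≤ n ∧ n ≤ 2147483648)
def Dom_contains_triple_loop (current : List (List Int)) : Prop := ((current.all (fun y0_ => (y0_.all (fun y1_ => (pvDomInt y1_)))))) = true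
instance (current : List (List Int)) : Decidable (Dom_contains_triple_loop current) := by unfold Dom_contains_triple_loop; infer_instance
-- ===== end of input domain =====

-- B replaces A's per-block-size triple-slice comparisons by rolling prefix hashes: one
-- hash test per block size, verified by a single slice comparison on a hash match.

-- ===== PORT A =====
-- A's while-loop: i runs n-1, n-2, …; breaks when 3*(len-i) > len.  For every call with
-- 1 ≤ ah.length the break fires at i = 0 at the latest, so the `| 0 => false` arm
-- (Python would continue with i = -1) is never reached on inputs A's caller produces.
def ctlA (ah : List String) (i : Nat) : Bool :=
  let n : Int := ah.length
  let ss : Int := n - (i : Int)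
  if n < ss * 3 then false
  else
    let first := PySem.List.slice ah (some (i : Int)) none
    let second := PySem.List.slice ah (some ((i : Int) - ss)) (some (i : Int))
    let third := PySem.List.slice ah (some ((i : Int) - ss * 2)) (some ((i : Int) - ss))
    if first == second && second == third then true
    else
      match i with
      | 0 => false
      | j + 1 => ctlA ah j

def contains_triple_loop (current : List (List Int)) : Bool :=
  let act_history := (current.headD []).map PySem.Int.toStr
  if act_history.length < 3 then false
  else ctlA act_history (act_history.length - 1)

-- ===== PORT B =====
def pvMOD : Int := 2305843009213693951
def pvBASE : Int := 1000003

-- _code(s): polynomial hash of one element's str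
def pvCode (s : String) : Int :=
  s.toList.foldl (fun c ch => PySem.Int.mod (c * pvBASE + (ch.toNat : Int) + 1) pvMOD) 0

def contains_triple_loop_alt (current : List (List Int)) : Bool :=
  let seq := (current.headD []).map PySem.Int.toStr
  let n := seq.length
  if n < 3 then false
  else
    let codes := seq.map pvCode
    let hp := codes.foldl (fun (p : Int × List Int) c =>
        let cur := PySem.Int.mod (p.1 * pvBASE + c + 1) pvMOD
        (cur, p.2 ++ [cur])) (0, [0])
    let h := hp.2
    let pwp := (PySem.List.pyRange 0 (n : Int) 1).foldl (fun (p : Int × List Int) _ =>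
        let q := PySem.Int.mod (p.1 * pvBASE) pvMOD
        (q, p.2 ++ [q])) (1, [1])
    let pw := pwp.2
    (PySem.List.pyRange 1 (PySem.Int.floordiv (n : Int) 3 + 1) 1).any fun k =>
      let ha := PySem.Int.mod (PySem.List.pyGetD h ((n : Int) - k) 0 -
        PySem.List.pyGetD h ((n : Int) - 3 * k) 0 * PySem.List.pyGetD pw (2 * k) 0) pvMOD
      let hb := PySem.Int.mod (PySem.List.pyGetD h ((n : Int)) 0 -
        PySem.List.pyGetD h ((n : Int) - 2 * k) 0 * PySem.List.pyGetD pw (2 * k) 0) pvMOD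
      ha == hb &&
        (PySem.List.slice seq (some ((n : Int) - 3 * k)) (some ((n : Int) - k)) ==
          PySem.List.slice seq (some ((n : Int) - 2 * k)) none)

-- ===== PRECONDITION & SPEC =====
-- Pre_ excludes only the empty outer list, on which Python A raises IndexError (current[0]).
def Pre_contains_triple_loop (current : List (List Int)) : Prop := current ≠ []
instance (current : List (List Int)) : Decidable (Pre_contains_triple_loop current) := by
  unfold Pre_contains_triple_loop; infer_instance

def pvWitness_contains_triple_loop : List (List Int) := [[1, 1, 1]]

def Spec_contains_triple_loop (current : List (List Int)) (out : Bool) : Prop := out = contains_triple_loop_alt current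
instance (current : List (List Int)) (out : Bool) : Decidable (Spec_contains_triple_loop current out) := by unfold Spec_contains_triple_loop; infer_instance

-- ===== CLAIM (what is proved, stated in full; the proofs are below) =====
def Claim_equal_contains_triple_loop : Prop := ∀ (current : List (List Int)), Dom_contains_triple_loop current → Pre_contains_triple_loop current → Spec_contains_triple_loop current (contains_triple_loop current)

-- ===== LEMMAS AND PROOFS =====

-- the test A performs for block size k (at i = n - k), written in terms of k
def condA (ah : List String) (k : Int) : Bool :=
  (PySem.List.slice ah (some ((ah.length : Int) - k)) none ==
     PySem.List.slice ah (some ((ah.length : Int) - 2 * k)) (some ((ah.length : Int) - k))) &&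
  (PySem.List.slice ah (some ((ah.length : Int) - 2 * k)) (some ((ah.length : Int) - k)) ==
     PySem.List.slice ah (some ((ah.length : Int) - 3 * k)) (some ((ah.length : Int) - 2 * k)))

-- A's descending-i loop re-indexed as an ascending search over block sizes k
def upK (ah : List String) (k : Int) : Bool :=
  if (ah.length : Int) < k * 3 then false
  else condA ah k || upK ah (k + 1)
termination_by ((ah.length : Int) + 1 - k).toNat
decreasing_by
  rename_i hk
  simp only [not_lt] at hk
  omega

lemma ctlA_eq_upK (ah : List String) (i : Nat) (hi : i < ah.length) :
    ctlA ah i = upK ah ((ah.length : Int) - i) := by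
  induction i with
  | zero =>
    rw [ctlA, upK]
    have hg : (ah.length : Int) < ((ah.length : Int) - ((0 : Nat) : Int)) * 3 := by
      push_cast; omega
    rw [if_pos hg, if_pos hg]
  | succ j ih =>
    rw [ctlA, upK]
    simp only [Nat.succ_eq_add_one]
    by_cases hg : (ah.length : Int) < ((ah.length : Int) - ((j + 1 : Nat) : Int)) * 3
    · rw [if_pos hg, if_pos hg]
    · rw [if_neg hg, if_neg hg, condA]
      have ea : (ah.length : Int) - ((ah.length : Int) - ((j + 1 : Nat) : Int)) = ((j + 1 : Nat) : Int) := by ring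
      have eb : (ah.length : Int) - 2 * ((ah.length : Int) - ((j + 1 : Nat) : Int))
          = ((j + 1 : Nat) : Int) - ((ah.length : Int) - ((j + 1 : Nat) : Int)) := by ring
      have ec : (ah.length : Int) - 3 * ((ah.length : Int) - ((j + 1 : Nat) : Int))
          = ((j + 1 : Nat) : Int) - ((ah.length : Int) - ((j + 1 : Nat) : Int)) * 2 := by ring
      rw [ea, eb, ec]
      by_cases hc : ((PySem.List.slice ah (some ((j + 1 : Nat) : Int)) none ==
          PySem.List.slice ah (some (((j + 1 : Nat) : Int) - ((ah.length : Int) - ((j + 1 : Nat) : Int)))) (some ((j + 1 : Nat) : Int))) &&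
        (PySem.List.slice ah (some (((j + 1 : Nat) : Int) - ((ah.length : Int) - ((j + 1 : Nat) : Int)))) (some ((j + 1 : Nat) : Int)) ==
          PySem.List.slice ah (some (((j + 1 : Nat) : Int) - ((ah.length : Int) - ((j + 1 : Nat) : Int)) * 2))
            (some (((j + 1 : Nat) : Int) - ((ah.length : Int) - ((j + 1 : Nat) : Int)))))) = true
      · rw [if_pos hc, hc, Bool.true_or]
      · rw [if_neg hc]
        have hf : ((PySem.List.slice ah (some ((j + 1 : Nat) : Int)) none ==
            PySem.List.slice ah (some (((j + 1 : Nat) : Int) - ((ah.length : Int) - ((j + 1 : Nat) : Int)))) (some ((j + 1 : Nat) : Int))) &&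
          (PySem.List.slice ah (some (((j + 1 : Nat) : Int) - ((ah.length : Int) - ((j + 1 : Nat) : Int)))) (some ((j + 1 : Nat) : Int)) ==
            PySem.List.slice ah (some (((j + 1 : Nat) : Int) - ((ah.length : Int) - ((j + 1 : Nat) : Int)) * 2))
              (some (((j + 1 : Nat) : Int) - ((ah.length : Int) - ((j + 1 : Nat) : Int)))))) = false := by
          revert hc
          cases ((PySem.List.slice ah (some ((j + 1 : Nat) : Int)) none ==
            PySem.List.slice ah (some (((j + 1 : Nat) : Int) - ((ah.length : Int) - ((j + 1 : Nat) : Int)))) (some ((j + 1 : Nat) : Int))) &&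
          (PySem.List.slice ah (some (((j + 1 : Nat) : Int) - ((ah.length : Int) - ((j + 1 : Nat) : Int)))) (some ((j + 1 : Nat) : Int)) ==
            PySem.List.slice ah (some (((j + 1 : Nat) : Int) - ((ah.length : Int) - ((j + 1 : Nat) : Int)) * 2))
              (some (((j + 1 : Nat) : Int) - ((ah.length : Int) - ((j + 1 : Nat) : Int)))))) <;> simp
        rw [hf, Bool.false_or]
        rw [show (ah.length : Int) - ((j + 1 : Nat) : Int) + 1 = (ah.length : Int) - (j : Int) from by push_cast; ring]
        exact ih (by omega)

lemma upK_eq_any (ah : List String) (k : Int) :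
    upK ah k = (PySem.List.pyRange k (PySem.Int.floordiv (ah.length : Int) 3 + 1) 1).any (condA ah) := by
  induction k using upK.induct ah with
  | case1 k hg =>
    rw [upK, if_pos hg, PySem.List.pyRange_one_eq_nil]
    · simp
    · have : PySem.Int.floordiv (ah.length : Int) 3 < k :=
        (PySem.Int.floordiv_lt_iff_lt_mul (by norm_num)).mpr (by linarith)
      omega
  | case2 k hg ih =>
    rw [upK, if_neg hg]
    have hk : k ≤ PySem.Int.floordiv (ah.length : Int) 3 :=
      (PySem.Int.le_floordiv_iff_mul_le (by norm_num)).mpr (by linarith [not_lt.mp hg])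
    rw [PySem.List.pyRange_one_cons (by omega), List.any_cons, ih]

-- hash-side machinery
def hstep (c x : Int) : Int := PySem.Int.mod (c * pvBASE + x + 1) pvMOD
def Hf (s : Int) (l : List Int) : Int := l.foldl hstep s

lemma fold_build (f : Int → Int → Int) (l : List Int) (s : Int) (acc : List Int) :
    (l.foldl (fun (p : Int × List Int) c => (f p.1 c, p.2 ++ [f p.1 c])) (s, acc)) =
      (l.foldl f s, acc ++ (List.range l.length).map (fun j => (l.take (j + 1)).foldl f s)) := by
  induction l generalizing s acc with
  | nil => simp
  | cons x t ih =>
    simp only [List.foldl_cons, List.length_cons, List.range_succ_eq_map, List.map_cons,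
      List.map_map, ih]
    simp [List.take_succ_cons, List.append_assoc, Function.comp_def]

lemma pvMOD_pos : (0 : Int) < pvMOD := by norm_num [pvMOD]

lemma mod_is_emod (a : Int) : PySem.Int.mod a pvMOD = a % pvMOD :=
  PySem.Int.mod_eq_emod_of_pos pvMOD_pos

lemma emod_modeq (a : Int) : a % pvMOD ≡ a [ZMOD pvMOD] :=
  Int.emod_emod_of_dvd a dvd_rfl

lemma hstep_congr {a a' : Int} (h : a ≡ a' [ZMOD pvMOD]) (x : Int) : hstep a x = hstep a' x := by
  unfold hstep
  rw [mod_is_emod, mod_is_emod, add_assoc, add_assoc]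
  exact (h.mul_right pvBASE).add_right (x + 1)

lemma Hf_congr {a a' : Int} (h : a ≡ a' [ZMOD pvMOD]) (l : List Int) :
    Hf a l ≡ Hf a' l [ZMOD pvMOD] := by
  induction l generalizing a a' with
  | nil => exact h
  | cons x t ih =>
    show Hf (hstep a x) t ≡ Hf (hstep a' x) t [ZMOD pvMOD]
    rw [hstep_congr h]

lemma Hf_shift (l : List Int) (s : Int) :
    Hf s l ≡ s * pvBASE ^ l.length + Hf 0 l [ZMOD pvMOD] := by
  induction l generalizing s with
  | nil => simp [Hf]
  | cons x t ih =>
    have h1 : Hf s (x :: t) = Hf (hstep s x) t := rfl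
    have h2 : hstep s x ≡ s * pvBASE + x + 1 [ZMOD pvMOD] := by
      unfold hstep; rw [mod_is_emod]; exact emod_modeq _
    calc Hf s (x :: t) = Hf (hstep s x) t := rfl
      _ ≡ Hf (s * pvBASE + x + 1) t [ZMOD pvMOD] := Hf_congr h2 t
      _ ≡ (s * pvBASE + x + 1) * pvBASE ^ t.length + Hf 0 t [ZMOD pvMOD] := ih _
      _ = s * pvBASE ^ (x :: t).length + ((x + 1) * pvBASE ^ t.length + Hf 0 t) := by
          simp [List.length_cons]; ring
      _ ≡ s * pvBASE ^ (x :: t).length + Hf 0 (x :: t) [ZMOD pvMOD] := by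
          have h3 : Hf 0 (x :: t) ≡ (x + 1) * pvBASE ^ t.length + Hf 0 t [ZMOD pvMOD] := by
            have h4 : hstep 0 x ≡ x + 1 [ZMOD pvMOD] := by
              unfold hstep
              rw [mod_is_emod]
              calc (0 * pvBASE + x + 1) % pvMOD ≡ 0 * pvBASE + x + 1 [ZMOD pvMOD] := emod_modeq _
                _ = x + 1 := by ring
            calc Hf 0 (x :: t) = Hf (hstep 0 x) t := rfl
              _ ≡ Hf (x + 1) t [ZMOD pvMOD] := Hf_congr h4 t
              _ ≡ (x + 1) * pvBASE ^ t.length + Hf 0 t [ZMOD pvMOD] := ih _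
          exact (Int.ModEq.add_left _ h3).symm

-- the list h built by B's fold, and its entries
lemma getH (codes : List Int) (b : Nat) (hb : b ≤ codes.length) :
    PySem.List.pyGetD
      ((codes.foldl (fun (p : Int × List Int) c =>
          (PySem.Int.mod (p.1 * pvBASE + c + 1) pvMOD,
           p.2 ++ [PySem.Int.mod (p.1 * pvBASE + c + 1) pvMOD])) (0, [0])).2)
      (b : Int) 0 = Hf 0 (codes.take b) := by
  rw [show (fun (p : Int × List Int) c =>
          (PySem.Int.mod (p.1 * pvBASE + c + 1) pvMOD,
           p.2 ++ [PySem.Int.mod (p.1 * pvBASE + c + 1) pvMOD]))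
        = (fun (p : Int × List Int) c => (hstep p.1 c, p.2 ++ [hstep p.1 c])) from rfl]
  rw [fold_build hstep, PySem.List.pyGetD_natCast]
  cases b with
  | zero => simp [Hf]
  | succ j =>
    have hj : j < codes.length := by omega
    simp only [List.singleton_append, List.getD_cons_succ]
    rw [List.getD_eq_getElem?_getD, List.getElem?_map, List.getElem?_range hj]
    rfl

lemma getPW (n : Nat) (d : Nat) (hd : d ≤ n) :
    PySem.List.pyGetD
      (((PySem.List.pyRange 0 (n : Int) 1).foldl (fun (p : Int × List Int) _ =>
          (PySem.Int.mod (p.1 * pvBASE) pvMOD, p.2 ++ [PySem.Int.mod (p.1 * pvBASE) pvMOD])) (1, [1])).2)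
      (d : Int) 0 = pvBASE ^ d % pvMOD := by
  have powfold : ∀ (l : List Int) (p : Int), 0 ≤ p → p < pvMOD →
      l.foldl (fun q (_ : Int) => PySem.Int.mod (q * pvBASE) pvMOD) p = p * pvBASE ^ l.length % pvMOD := by
    intro l
    induction l with
    | nil => intro p h0 h1; simp [Int.emod_eq_of_lt h0 h1]
    | cons x t ih =>
      intro p h0 h1
      simp only [List.foldl_cons, List.length_cons]
      rw [ih _ (PySem.Int.mod_nonneg _ pvMOD_pos) (PySem.Int.mod_lt _ pvMOD_pos)]
      rw [mod_is_emod]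
      conv_lhs => rw [Int.mul_emod, Int.emod_emod_of_dvd _ dvd_rfl, ← Int.mul_emod]
      rw [show p * pvBASE * pvBASE ^ t.length = p * pvBASE ^ (t.length + 1) by ring]
  rw [show (fun (p : Int × List Int) (c : Int) =>
          (PySem.Int.mod (p.1 * pvBASE) pvMOD, p.2 ++ [PySem.Int.mod (p.1 * pvBASE) pvMOD]))
        = (fun (p : Int × List Int) c => ((fun q (_ : Int) => PySem.Int.mod (q * pvBASE) pvMOD) p.1 c,
            p.2 ++ [(fun q (_ : Int) => PySem.Int.mod (q * pvBASE) pvMOD) p.1 c])) from rfl]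
  rw [fold_build (fun q (_ : Int) => PySem.Int.mod (q * pvBASE) pvMOD), PySem.List.pyGetD_natCast]
  cases d with
  | zero => simp; norm_num [pvMOD]
  | succ j =>
    have hj : j < ((PySem.List.pyRange 0 (n : Int) 1)).length := by
      rw [PySem.List.length_pyRange_one]; omega
    simp only [List.singleton_append, List.getD_cons_succ]
    rw [List.getD_eq_getElem?_getD, List.getElem?_map, List.getElem?_range hj]
    simp only [Option.map_some, Option.getD_some]
    rw [powfold _ 1 (by norm_num) (by norm_num [pvMOD])]
    rw [List.length_take, PySem.List.length_pyRange_one]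
    simp only [one_mul]
    congr 2
    omega

lemma seg_hash (codes : List Int) (a b : Nat) (hab : a ≤ b) (hb : b ≤ codes.length) :
    (Hf 0 (codes.take b) - Hf 0 (codes.take a) * (pvBASE ^ (b - a) % pvMOD)) % pvMOD
      = Hf 0 ((codes.drop a).take (b - a)) % pvMOD := by
  have hsplit : codes.take b = codes.take a ++ (codes.drop a).take (b - a) := by
    rw [← List.take_add]
    congr 1
    omega
  have hlen : ((codes.drop a).take (b - a)).length = b - a := by
    rw [List.length_take, List.length_drop]; omega
  have h1 : Hf 0 (codes.take b) = Hf (Hf 0 (codes.take a)) ((codes.drop a).take (b - a)) := by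
    rw [hsplit]; exact List.foldl_append ..
  have h2 : Hf 0 (codes.take b) ≡
      Hf 0 (codes.take a) * pvBASE ^ (b - a) + Hf 0 ((codes.drop a).take (b - a)) [ZMOD pvMOD] := by
    have h := Hf_shift ((codes.drop a).take (b - a)) (Hf 0 (codes.take a))
    rw [hlen] at h
    rw [h1]
    exact h
  have h3 : Hf 0 (codes.take b) - Hf 0 (codes.take a) * (pvBASE ^ (b - a) % pvMOD) ≡
      Hf 0 ((codes.drop a).take (b - a)) [ZMOD pvMOD] := by
    calc Hf 0 (codes.take b) - Hf 0 (codes.take a) * (pvBASE ^ (b - a) % pvMOD)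
        ≡ (Hf 0 (codes.take a) * pvBASE ^ (b - a) + Hf 0 ((codes.drop a).take (b - a)))
          - Hf 0 (codes.take a) * (pvBASE ^ (b - a)) [ZMOD pvMOD] :=
          h2.sub ((Int.ModEq.refl _).mul (emod_modeq _))
      _ = Hf 0 ((codes.drop a).take (b - a)) := by ring
  exact h3

lemma condB_eq_condA (seq : List String) (k : Int) (hk1 : 1 ≤ k)
    (hk2 : k * 3 ≤ (seq.length : Int)) :
    ((PySem.Int.mod (PySem.List.pyGetD
        (((seq.map pvCode).foldl (fun (p : Int × List Int) c =>
            (PySem.Int.mod (p.1 * pvBASE + c + 1) pvMOD,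
             p.2 ++ [PySem.Int.mod (p.1 * pvBASE + c + 1) pvMOD])) (0, [0])).2)
        ((seq.length : Int) - k) 0 -
      PySem.List.pyGetD
        (((seq.map pvCode).foldl (fun (p : Int × List Int) c =>
            (PySem.Int.mod (p.1 * pvBASE + c + 1) pvMOD,
             p.2 ++ [PySem.Int.mod (p.1 * pvBASE + c + 1) pvMOD])) (0, [0])).2)
        ((seq.length : Int) - 3 * k) 0 *
      PySem.List.pyGetD
        (((PySem.List.pyRange 0 (seq.length : Int) 1).foldl (fun (p : Int × List Int) _ =>
            (PySem.Int.mod (p.1 * pvBASE) pvMOD, p.2 ++ [PySem.Int.mod (p.1 * pvBASE) pvMOD])) (1, [1])).2)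
        (2 * k) 0) pvMOD ==
      PySem.Int.mod (PySem.List.pyGetD
        (((seq.map pvCode).foldl (fun (p : Int × List Int) c =>
            (PySem.Int.mod (p.1 * pvBASE + c + 1) pvMOD,
             p.2 ++ [PySem.Int.mod (p.1 * pvBASE + c + 1) pvMOD])) (0, [0])).2)
        ((seq.length : Int)) 0 -
      PySem.List.pyGetD
        (((seq.map pvCode).foldl (fun (p : Int × List Int) c =>
            (PySem.Int.mod (p.1 * pvBASE + c + 1) pvMOD,
             p.2 ++ [PySem.Int.mod (p.1 * pvBASE + c + 1) pvMOD])) (0, [0])).2)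
        ((seq.length : Int) - 2 * k) 0 *
      PySem.List.pyGetD
        (((PySem.List.pyRange 0 (seq.length : Int) 1).foldl (fun (p : Int × List Int) _ =>
            (PySem.Int.mod (p.1 * pvBASE) pvMOD, p.2 ++ [PySem.Int.mod (p.1 * pvBASE) pvMOD])) (1, [1])).2)
        (2 * k) 0) pvMOD) &&
      (PySem.List.slice seq (some ((seq.length : Int) - 3 * k)) (some ((seq.length : Int) - k)) ==
        PySem.List.slice seq (some ((seq.length : Int) - 2 * k)) none))
    = condA seq k := by
  have hkn : k = (k.toNat : Int) := by omega
  set n := seq.length with hn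
  set kn := k.toNat with hknd
  have e1 : (n : Int) - k = ((n - kn : Nat) : Int) := by omega
  have e2 : (n : Int) - 2 * k = ((n - 2 * kn : Nat) : Int) := by omega
  have e3 : (n : Int) - 3 * k = ((n - 3 * kn : Nat) : Int) := by omega
  have e4 : (2 : Int) * k = ((2 * kn : Nat) : Int) := by omega
  rw [condA]
  rw [e1, e2, e3, e4]
  rw [getH _ _ (by rw [List.length_map]; omega)]
  rw [getH _ _ (by rw [List.length_map]; omega)]
  rw [getH (seq.map pvCode) n (by rw [List.length_map])]
  rw [getH _ _ (by rw [List.length_map]; omega)]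
  rw [getPW n (2 * kn) (by omega)]
  rw [mod_is_emod, mod_is_emod]
  have eba : (n - kn) - (n - 3 * kn) = 2 * kn := by omega
  have ebb : n - (n - 2 * kn) = 2 * kn := by omega
  have s1 := seg_hash (seq.map pvCode) (n - 3 * kn) (n - kn) (by omega) (by rw [List.length_map]; omega)
  rw [eba] at s1
  have s2 := seg_hash (seq.map pvCode) (n - 2 * kn) n (by omega) (by rw [List.length_map])
  rw [ebb] at s2
  rw [s1, s2]
  simp only [PySem.List.slice_natCast, PySem.List.slice_from_natCast]
  have ekb : (n - kn) - (n - 2 * kn) = kn := by omega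
  have ekc : (n - 2 * kn) - (n - 3 * kn) = kn := by omega
  rw [ekb, ekc, eba]
  have hlenY : (List.take kn (List.drop (n - 2 * kn) seq)).length = kn := by
    simp [List.length_take, List.length_drop]; omega
  have hlenZ : (List.take kn (List.drop (n - 3 * kn) seq)).length = kn := by
    simp [List.length_take, List.length_drop]; omega
  have c1 : List.take (2 * kn) (List.drop (n - 3 * kn) seq)
      = List.take kn (List.drop (n - 3 * kn) seq) ++ List.take kn (List.drop (n - 2 * kn) seq) := by
    conv_lhs => rw [show 2 * kn = kn + kn from by ring]
    rw [List.take_add, List.drop_drop, show (n - 3 * kn) + kn = n - 2 * kn from by omega]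
  have c2 : List.drop (n - 2 * kn) seq
      = List.take kn (List.drop (n - 2 * kn) seq) ++ List.drop (n - kn) seq := by
    conv_lhs => rw [← List.take_append_drop kn (List.drop (n - 2 * kn) seq)]
    rw [List.drop_drop, show (n - 2 * kn) + kn = n - kn from by omega]
  have m1 : List.take (2 * kn) (List.drop (n - 3 * kn) (List.map pvCode seq))
      = List.map pvCode (List.take (2 * kn) (List.drop (n - 3 * kn) seq)) := by
    rw [← List.map_drop, ← List.map_take]
  have m2 : List.take (2 * kn) (List.drop (n - 2 * kn) (List.map pvCode seq))
      = List.map pvCode (List.take (2 * kn) (List.drop (n - 2 * kn) seq)) := by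
    rw [← List.map_drop, ← List.map_take]
  have m2' : List.take (2 * kn) (List.drop (n - 2 * kn) seq) = List.drop (n - 2 * kn) seq :=
    List.take_of_length_le (by simp [List.length_drop]; omega)
  by_cases hc : List.drop (n - kn) seq = List.take kn (List.drop (n - 2 * kn) seq)
      ∧ List.take kn (List.drop (n - 2 * kn) seq) = List.take kn (List.drop (n - 3 * kn) seq)
  · obtain ⟨h1, h2⟩ := hc
    have hs : List.take (2 * kn) (List.drop (n - 3 * kn) seq) = List.drop (n - 2 * kn) seq := by
      rw [c1]
      conv_rhs => rw [c2]
      rw [h1, h2]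
    have hh : Hf 0 (List.take (2 * kn) (List.drop (n - 3 * kn) (List.map pvCode seq))) % pvMOD
        = Hf 0 (List.take (2 * kn) (List.drop (n - 2 * kn) (List.map pvCode seq))) % pvMOD := by
      rw [m1, m2, m2', hs]
    simp [h1, h2, hs, hh]
  · have hs : ¬ (List.take (2 * kn) (List.drop (n - 3 * kn) seq) = List.drop (n - 2 * kn) seq) := by
      intro h
      rw [c1] at h
      have h' : List.take kn (List.drop (n - 3 * kn) seq) ++ List.take kn (List.drop (n - 2 * kn) seq)
          = List.take kn (List.drop (n - 2 * kn) seq) ++ List.drop (n - kn) seq := by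
        rw [← c2]; exact h
      have hij := List.append_inj h' (hlenZ.trans hlenY.symm)
      exact hc ⟨hij.2.symm, hij.1.symm⟩
    have r : ((List.drop (n - kn) seq == List.take kn (List.drop (n - 2 * kn) seq)) &&
        (List.take kn (List.drop (n - 2 * kn) seq) == List.take kn (List.drop (n - 3 * kn) seq))) = false := by
      rcases not_and_or.mp hc with h | h
      · simp [h]
      · simp [h]
    rw [r]
    simp [hs]

-- ===== VERDICT (by name: the statement is the Claim_ definition above) =====
theorem contains_triple_loop_spec : Claim_equal_contains_triple_loop := by
  intro current _hdom _hpre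
  unfold Spec_contains_triple_loop
  rw [contains_triple_loop, contains_triple_loop_alt]
  by_cases h3 : ((current.headD []).map PySem.Int.toStr).length < 3
  · rw [if_pos h3, if_pos h3]
  · rw [if_neg h3, if_neg h3]
    rw [ctlA_eq_upK _ _ (by omega)]
    rw [show ((((current.headD []).map PySem.Int.toStr).length : Int) -
        ((((current.headD []).map PySem.Int.toStr).length - 1 : Nat) : Int)) = 1 from by omega]
    rw [upK_eq_any]
    apply PySem.List.any_congr_mem
    intro x hx
    rw [PySem.List.mem_pyRange_one] at hx
    have hx2 : x * 3 ≤ (((current.headD []).map PySem.Int.toStr).length : Int) := by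
      have := hx.2
      have h := (PySem.Int.le_floordiv_iff_mul_le (a := (((current.headD []).map PySem.Int.toStr).length : Int)) (b := 3) (q := x) (by norm_num)).mp (by omega)
      exact h
    exact (condB_eq_condA _ x hx.1 hx2).symm
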